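-- pv_equiv track=rewrite | github.com/SlimedLeviathan/python-fast-sorting-algo | efficient.py | effSort
-- ===== SOURCE A (Python) =====
-- def effSort(unsortedList):
--     lowerList = []
--     upperList = []
--
--     lowerList.append(unsortedList[0])
--     upperList.append(unsortedList[0])
--
--     unsortedList.pop(0) # pop the first one since its in both lists already
--
--     for num in unsortedList:
--         if (num < lowerList[0]):
--             lowerList.insert(0, num)
--
--         if (num > upperList[-1]):
--             upperList.append(num)
--
--     lowerList.pop() # pop the end of the lower list since it is the first number
--
--     lowerList.extend(upperList)
--
--     return lowerList
-- ===== SOURCE B (Python) =====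
-- def effSort(unsortedList):
--     # Stage 1: materialize the prefix-minimum and prefix-maximum arrays.
--     lo = hi = unsortedList[0]
--     pm = []
--     px = []
--     for x in unsortedList:
--         lo = min(lo, x)
--         hi = max(hi, x)
--         pm.append(lo)
--         px.append(hi)
--     # Stage 2: the answer is the change points of those scans.
--     lower = [b for a, b in zip(pm, pm[1:]) if b < a]
--     upper = [px[0]] + [b for a, b in zip(px, px[1:]) if b > a]
--     return lower[::-1] + upper
-- ===== Notes on version B (the rewrite author's own statement) =====
-- stated objective: alternative
-- what changed: Instead of A's conditional collecting during the scan (insert-at-front of each new minimum, append of each new maximum, plus a destructive pop(0) of the argument), B first materializes the prefix-minimum and prefix-maximum scan arrays and then extracts their change points by filtering adjacent pairs; B does not mutate its argument.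
import Mathlib
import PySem

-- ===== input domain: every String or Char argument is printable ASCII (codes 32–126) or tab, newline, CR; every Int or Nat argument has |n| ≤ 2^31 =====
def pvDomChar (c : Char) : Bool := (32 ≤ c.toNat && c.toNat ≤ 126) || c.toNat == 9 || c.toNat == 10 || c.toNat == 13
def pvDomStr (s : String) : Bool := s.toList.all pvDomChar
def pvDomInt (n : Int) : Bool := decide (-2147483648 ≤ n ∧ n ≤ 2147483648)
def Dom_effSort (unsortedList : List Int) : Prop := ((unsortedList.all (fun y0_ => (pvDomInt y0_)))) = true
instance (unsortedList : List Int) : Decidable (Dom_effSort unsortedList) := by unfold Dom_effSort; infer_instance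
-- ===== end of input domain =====

-- B replaces A's conditional collecting (insert-at-front of new minima / append of new maxima while scanning)
-- by two stages: materialize the prefix-minimum and prefix-maximum scans, then extract their change points by
-- filtering adjacent pairs. Equivalence is about the RETURN value only: A pops the first element of its
-- argument (caller-visible mutation), B does not mutate it.

-- ===== PORT A =====
-- loop body of A: lowerList.insert(0, num) when num < lowerList[0]; upperList.append(num) when num > upperList[-1]
-- (both lists are always nonempty in A, so headD/getLastD 0 are exact)
def stepA (st : List Int × List Int) (num : Int) : List Int × List Int :=
  (if num < st.1.headD 0 then num :: st.1 else st.1,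
   if num > st.2.getLastD 0 then st.2 ++ [num] else st.2)

def effSort (unsortedList : List Int) : List Int :=
  match unsortedList with
  | [] => []   -- Python raises IndexError on unsortedList[0]; excluded by Pre_effSort
  | first :: rest =>
    -- lowerList = [first]; upperList = [first]; unsortedList.pop(0); for num in unsortedList: …
    let st := rest.foldl stepA ([first], [first])
    -- lowerList.pop(); lowerList.extend(upperList); return lowerList
    st.1.dropLast ++ st.2

-- ===== PORT B =====
-- adjacent pairs zip(l, l[1:])
def adjP (l : List Int) : List (Int × Int) := l.zip (l.drop 1)
-- [b for a, b in zip(l, l[1:]) if b < a]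
def chLt (l : List Int) : List Int := ((adjP l).filter (fun p => p.2 < p.1)).map (·.2)
-- [b for a, b in zip(l, l[1:]) if b > a]
def chGt (l : List Int) : List Int := ((adjP l).filter (fun p => p.2 > p.1)).map (·.2)

-- loop body of B: state (lo, hi, pm, px); pm.append(min(lo,x)), px.append(max(hi,x))
def stepB (st : Int × Int × List Int × List Int) (x : Int) : Int × Int × List Int × List Int :=
  (min st.1 x, max st.2.1 x, st.2.2.1 ++ [min st.1 x], st.2.2.2 ++ [max st.2.1 x])

def effSort_alt (unsortedList : List Int) : List Int :=
  match unsortedList with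
  | [] => []   -- Python raises IndexError on unsortedList[0]; excluded by Pre_effSort
  | first :: _ =>
    let st := unsortedList.foldl stepB (first, first, [], [])
    let pm := st.2.2.1
    let px := st.2.2.2
    -- px is nonempty here (one element appended per input element), so px[0] = px.headD 0 exactly
    (chLt pm).reverse ++ (px.headD 0 :: chGt px)

-- ===== PRECONDITION & SPEC =====
-- Pre_ excludes only the empty list, on which both Pythons raise IndexError.
def Pre_effSort (unsortedList : List Int) : Prop := unsortedList ≠ []
instance (unsortedList : List Int) : Decidable (Pre_effSort unsortedList) := by unfold Pre_effSort; infer_instance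
def pvWitness_effSort : List Int := ([3, 1, 4, 1, 5])

def Spec_effSort (unsortedList : List Int) (out : List Int) : Prop := out = effSort_alt unsortedList
instance (unsortedList : List Int) (out : List Int) : Decidable (Spec_effSort unsortedList out) := by unfold Spec_effSort; infer_instance

-- ===== CLAIM (what is proved, stated in full; the proofs are below) =====
def Claim_equal_effSort : Prop := ∀ (unsortedList : List Int), Dom_effSort unsortedList → Pre_effSort unsortedList → Spec_effSort unsortedList (effSort unsortedList)

-- ===== LEMMAS AND PROOFS =====

lemma adjP_append (l : List Int) (m : Int) (h : l ≠ []) :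
    adjP (l ++ [m]) = adjP l ++ [(l.getLastD 0, m)] := by
  induction l with
  | nil => simp at h
  | cons a t ih =>
    match t with
    | [] => simp [adjP]
    | b :: t' =>
      have := ih (by simp)
      simp only [adjP] at this ⊢
      simp only [List.cons_append, List.drop_succ_cons, List.drop_zero, List.zip_cons_cons] at this ⊢
      rw [this]
      simp

lemma chLt_append (l : List Int) (m : Int) (h : l ≠ []) :
    chLt (l ++ [m]) = chLt l ++ (if m < l.getLastD 0 then [m] else []) := by
  unfold chLt
  rw [adjP_append l m h]
  by_cases hc : m < l.getLastD 0
  · rw [if_pos hc]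
    rw [List.getLastD_eq_getLast?] at hc
    simp [List.filter_append, hc]
  · rw [if_neg hc]
    rw [List.getLastD_eq_getLast?] at hc
    simp [List.filter_append, hc]

lemma chGt_append (l : List Int) (m : Int) (h : l ≠ []) :
    chGt (l ++ [m]) = chGt l ++ (if m > l.getLastD 0 then [m] else []) := by
  unfold chGt
  rw [adjP_append l m h]
  by_cases hc : m > l.getLastD 0
  · rw [if_pos hc]
    rw [gt_iff_lt, List.getLastD_eq_getLast?] at hc
    simp [List.filter_append, hc]
  · rw [if_neg hc]
    rw [gt_iff_lt, List.getLastD_eq_getLast?] at hc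
    simp [List.filter_append, hc]

lemma headD_append_of_ne (l : List Int) (m : List Int) (h : l ≠ []) :
    (l ++ m).headD 0 = l.headD 0 := by
  cases l with
  | nil => simp at h
  | cons a t => simp

lemma getLastD_cons_concat (h x : Int) (l : List Int) :
    (h :: (l ++ [x])).getLastD 0 = x := by
  rw [← List.cons_append, List.getLastD_concat]

lemma key (rest : List Int) : ∀ (first lo hi : Int) (pm px : List Int),
    pm ≠ [] → px ≠ [] →
    pm.getLastD 0 = lo → px.getLastD 0 = hi →
    ((chLt pm).reverse ++ [first]).headD 0 = lo →
    (px.headD 0 :: chGt px).getLastD 0 = hi →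
    rest.foldl stepA ((chLt pm).reverse ++ [first], px.headD 0 :: chGt px) =
      ((chLt (rest.foldl stepB (lo, hi, pm, px)).2.2.1).reverse ++ [first],
       (rest.foldl stepB (lo, hi, pm, px)).2.2.2.headD 0
         :: chGt (rest.foldl stepB (lo, hi, pm, px)).2.2.2) := by
  induction rest with
  | nil => intro first lo hi pm px _ _ _ _ _ _; simp [List.foldl]
  | cons num rest ih =>
    intro first lo hi pm px hpm hpx hlo hhi hl hu
    simp only [List.foldl, stepA, stepB]
    rw [hl, hu]
    have hpm' : pm ++ [min lo num] ≠ [] := by simp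
    have hpx' : px ++ [max hi num] ≠ [] := by simp
    have hdpx : (px ++ [max hi num]).headD 0 = px.headD 0 := headD_append_of_ne px _ hpx
    have hCL := chLt_append pm (min lo num) hpm
    have hCG := chGt_append px (max hi num) hpx
    rw [hlo] at hCL
    rw [hhi] at hCG
    by_cases h1 : num < lo <;> by_cases h2 : num > hi
    · rw [if_pos h1, if_pos h2]
      rw [min_eq_right (le_of_lt h1)] at hCL hpm' ⊢
      rw [max_eq_right (le_of_lt h2)] at hCG hpx' hdpx ⊢
      rw [if_pos h1] at hCL
      rw [if_pos h2] at hCG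
      have := ih first num num (pm ++ [num]) (px ++ [num]) hpm' hpx'
        (by simp) (by simp)
        (by rw [hCL]; simp)
        (by rw [hdpx, hCG]; exact getLastD_cons_concat _ _ _)
      rw [hCL, hdpx, hCG] at this
      rw [show (chLt pm ++ [num]).reverse ++ [first] = num :: ((chLt pm).reverse ++ [first]) by simp,
          show px.headD 0 :: (chGt px ++ [num]) = (px.headD 0 :: chGt px) ++ [num] by simp] at this
      exact this
    · rw [if_pos h1, if_neg h2]
      rw [min_eq_right (le_of_lt h1)] at hCL hpm' ⊢
      rw [max_eq_left (by omega : num ≤ hi)] at hCG hpx' hdpx ⊢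
      rw [if_pos h1] at hCL
      rw [if_neg (by omega : ¬ hi > hi)] at hCG
      have := ih first num hi (pm ++ [num]) (px ++ [hi]) hpm' hpx'
        (by simp) (by simp)
        (by rw [hCL]; simp)
        (by rw [hdpx, hCG]; simpa using hu)
      rw [hCL, hdpx, hCG] at this
      rw [show (chLt pm ++ [num]).reverse ++ [first] = num :: ((chLt pm).reverse ++ [first]) by simp] at this
      simpa using this
    · rw [if_neg h1, if_pos h2]
      rw [min_eq_left (by omega : lo ≤ num)] at hCL hpm' ⊢
      rw [max_eq_right (le_of_lt h2)] at hCG hpx' hdpx ⊢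
      rw [if_neg (by omega : ¬ lo < lo)] at hCL
      rw [if_pos h2] at hCG
      have := ih first lo num (pm ++ [lo]) (px ++ [num]) hpm' hpx'
        (by simp) (by simp)
        (by rw [hCL]; simpa using hl)
        (by rw [hdpx, hCG]; exact getLastD_cons_concat _ _ _)
      rw [hCL, hdpx, hCG] at this
      rw [show px.headD 0 :: (chGt px ++ [num]) = (px.headD 0 :: chGt px) ++ [num] by simp] at this
      simpa using this
    · rw [if_neg h1, if_neg h2]
      rw [min_eq_left (by omega : lo ≤ num)] at hCL hpm' ⊢
      rw [max_eq_left (by omega : num ≤ hi)] at hCG hpx' hdpx ⊢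
      rw [if_neg (by omega : ¬ lo < lo)] at hCL
      rw [if_neg (by omega : ¬ hi > hi)] at hCG
      have := ih first lo hi (pm ++ [lo]) (px ++ [hi]) hpm' hpx'
        (by simp) (by simp)
        (by rw [hCL]; simpa using hl)
        (by rw [hdpx, hCG]; simpa using hu)
      rw [hCL, hdpx, hCG] at this
      simpa using this

-- ===== VERDICT (by name: the statement is the Claim_ definition above) =====
theorem effSort_spec : Claim_equal_effSort := by
  intro unsortedList _ hpre
  unfold Spec_effSort
  match unsortedList with
  | [] => exact absurd rfl hpre
  | first :: rest =>
    simp only [effSort, effSort_alt]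
    rw [show (first :: rest).foldl stepB (first, first, [], []) =
        rest.foldl stepB (first, first, [first], [first]) from by simp [List.foldl, stepB]]
    have e1 : (chLt [first]).reverse ++ [first] = [first] := by simp [chLt, adjP]
    have e2 : ([first] : List Int).headD 0 :: chGt [first] = [first] := by simp [chGt, adjP]
    have h := key rest first first first [first] [first] (by simp) (by simp) (by simp) (by simp)
      (by rw [e1]; simp) (by rw [e2]; simp)
    rw [e1, e2] at h
    rw [h]
    simp
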